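-- pv_equiv track=rewrite | github.com/wocl123/programmers | k_number.py | solution
-- ===== SOURCE A (Python) =====
-- def solution(array, commands):
--     answer = []
--
--     for i in range(len(commands)):
--         result = array[commands[i][0]-1 : commands[i][1]]
--         result.sort()
--         temp = commands[i][2]
--         answer.append(result[temp-1])
--     return answer
-- ===== SOURCE B (Python) =====
-- def solution(array, commands):
--     # Selection-based: collect the k smallest of the slice by repeated min-extraction,
--     # instead of fully sorting the slice.
--     answer = []
--     for c in commands:
--         sub = array[c[0]-1:c[1]]
--         k = c[2]
--         smallest = []
--         for _ in range(k):
--             m = min(sub)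
--             sub.remove(m)
--             smallest.append(m)
--         answer.append(smallest[k-1])
--     return answer
-- ===== Notes on version B (the rewrite author's own statement) =====
-- stated objective: alternative
-- what changed: Instead of fully sorting each slice and indexing, B extracts the k smallest elements of the slice one by one via repeated min-removal and returns the last one extracted (partial selection instead of a full sort).
-- outside the precondition, e.g. on solution([1, 2], [[1, 2, 0]]): A returns [2], B raises IndexError
import Mathlib
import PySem

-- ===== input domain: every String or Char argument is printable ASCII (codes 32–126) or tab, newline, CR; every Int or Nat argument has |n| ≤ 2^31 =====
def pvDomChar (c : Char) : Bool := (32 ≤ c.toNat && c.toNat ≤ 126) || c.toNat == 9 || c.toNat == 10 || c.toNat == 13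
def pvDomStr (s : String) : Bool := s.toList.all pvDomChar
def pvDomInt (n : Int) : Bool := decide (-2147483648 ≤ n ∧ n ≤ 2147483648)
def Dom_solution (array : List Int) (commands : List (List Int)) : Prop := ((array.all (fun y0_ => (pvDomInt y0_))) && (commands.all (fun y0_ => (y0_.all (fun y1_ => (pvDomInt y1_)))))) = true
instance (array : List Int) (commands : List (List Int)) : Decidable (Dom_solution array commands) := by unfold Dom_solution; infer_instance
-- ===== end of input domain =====

-- B replaces the full sort of each slice by a repeated-min selection of the k smallest
-- elements (alternative algorithm; not claimed faster).

-- ===== PORT A =====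
def solution (array : List Int) (commands : List (List Int)) : List Int :=
  (PySem.List.pyRange 0 (commands.length : Int) 1).foldl (fun answer i =>
    let cmd := PySem.List.pyGetD commands i []
    let result := PySem.List.sorted
      (PySem.List.slice array (some (PySem.List.pyGetD cmd 0 0 - 1)) (some (PySem.List.pyGetD cmd 1 0)))
      (fun x => x) false
    let temp := PySem.List.pyGetD cmd 2 0
    answer ++ [PySem.List.pyGetD result (temp - 1) 0]) []

-- ===== PORT B =====
-- one iteration of B's inner loop: extract the current minimum of the remaining slice
def selectStep (p : List Int × List Int) : List Int × List Int :=
  let m := (PySem.List.min? p.1 (fun x => x)).getD 0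
  ((PySem.List.remove? p.1 m).getD p.1, p.2 ++ [m])

def solution_alt (array : List Int) (commands : List (List Int)) : List Int :=
  commands.foldl (fun answer c =>
    let sub := PySem.List.slice array (some (PySem.List.pyGetD c 0 0 - 1)) (some (PySem.List.pyGetD c 1 0))
    let k := PySem.List.pyGetD c 2 0
    let st := (PySem.List.pyRange 0 k 1).foldl (fun p _ => selectStep p) (sub, [])
    answer ++ [PySem.List.pyGetD st.2 (k - 1) 0]) []

-- ===== PRECONDITION & SPEC =====
-- Pre_ excludes commands with fewer than 3 entries or whose rank k lies outside 1..len(slice):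
-- there A raises IndexError, except for k in [1-len(slice), 0], where A returns a value only by
-- Python negative-index wraparound (an accident of the implementation) while B's selection loop
-- raises IndexError.
def Pre_solution (array : List Int) (commands : List (List Int)) : Prop :=
  ∀ c ∈ commands, 3 ≤ c.length ∧ 1 ≤ PySem.List.pyGetD c 2 0 ∧
    PySem.List.pyGetD c 2 0 ≤
      ((PySem.List.slice array (some (PySem.List.pyGetD c 0 0 - 1)) (some (PySem.List.pyGetD c 1 0))).length : Int)
instance (array : List Int) (commands : List (List Int)) : Decidable (Pre_solution array commands) := by
  unfold Pre_solution; infer_instance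

def pvWitness_solution : List Int × List (List Int) := ([3, 1, 2], [[1, 3, 2]])

def Spec_solution (array : List Int) (commands : List (List Int)) (out : List Int) : Prop := out = solution_alt array commands
instance (array : List Int) (commands : List (List Int)) (out : List Int) : Decidable (Spec_solution array commands out) := by unfold Spec_solution; infer_instance

-- ===== CLAIM (what is proved, stated in full; the proofs are below) =====
def Claim_equal_solution : Prop := ∀ (array : List Int) (commands : List (List Int)), Dom_solution array commands → Pre_solution array commands → Spec_solution array commands (solution array commands)

-- ===== LEMMAS AND PROOFS =====

-- a fold whose body ignores the list elements is an iterate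
theorem foldl_const_iterate {α β : Type} (g : β → β) (l : List α) (init : β) :
    l.foldl (fun p _ => g p) init = g^[l.length] init := by
  induction l generalizing init with
  | nil => rfl
  | cons x xs ih => simp [List.foldl_cons, ih, Function.iterate_succ_apply]

-- min? of a nonempty Int list is the head of its sorted version
theorem min_eq_sorted_head (s : List Int) (m : Int) (t : List Int)
    (h : PySem.List.sorted s (fun x => x) false = m :: t) :
    (PySem.List.min? s (fun x => x)).getD 0 = m := by
  have hm_mem : m ∈ s := by
    have hm : m ∈ PySem.List.sorted s (fun x => x) false := by rw [h]; simp
    exact (PySem.List.mem_sorted s (fun x => x) false m).mp hm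
  cases hmin : PySem.List.min? s (fun x => x) with
  | none =>
      rw [PySem.List.min?_eq_none_iff] at hmin
      subst hmin; simp at hm_mem
  | some v =>
      have hv_mem : v ∈ s := PySem.List.min?_mem hmin
      have h1 : v ≤ m := PySem.List.min?_isMin hmin m hm_mem
      have hp : (m :: t).Pairwise (fun a b : Int => a ≤ b) := by
        have hp0 := PySem.List.sorted_pairwise (xs := s) (key := fun x => x)
        rw [h] at hp0; exact hp0
      have hv_sorted : v ∈ m :: t := by
        rw [← h]; exact (PySem.List.mem_sorted s (fun x => x) false v).mpr hv_mem
      have h2 : m ≤ v := by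
        rcases List.mem_cons.mp hv_sorted with hv | hv
        · exact le_of_eq hv.symm
        · exact List.rel_of_pairwise_cons hp hv
      simp only [Option.getD_some]
      exact le_antisymm h1 h2

-- removing the head of the sorted version sorts to the tail
theorem sorted_remove_head (s : List Int) (m : Int) (t : List Int)
    (h : PySem.List.sorted s (fun x => x) false = m :: t) :
    PySem.List.sorted ((PySem.List.remove? s m).getD s) (fun x => x) false = t := by
  have hm_mem : m ∈ s := by
    have hm : m ∈ PySem.List.sorted s (fun x => x) false := by rw [h]; simp
    exact (PySem.List.mem_sorted s (fun x => x) false m).mp hm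
  rw [show PySem.List.remove? s m = some (s.erase m) from PySem.List.remove?_eq_some_erase s m hm_mem]
  simp only [Option.getD_some]
  have hsp : (PySem.List.sorted s (fun x => x) false).Perm s := PySem.List.sorted_perm s (fun x => x) false
  have h2 : s.Perm (m :: t) := (h ▸ hsp).symm
  have h3 := h2.erase m
  rw [List.erase_cons_head] at h3
  have hperm : t.Perm (s.erase m) := h3.symm
  have hpw : t.Pairwise (fun a b : Int => a ≤ b) := by
    have hp := PySem.List.sorted_pairwise (xs := s) (key := fun x => x)
    rw [h] at hp
    exact hp.tail
  exact PySem.List.sorted_id_eq_of_perm_of_pairwise _ _ hperm hpw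

-- invariant of B's selection loop
theorem select_inv (s : List Int) (n : Nat) (hn : n ≤ s.length) :
    PySem.List.sorted (selectStep^[n] (s, ([] : List Int))).1 (fun x => x) false
      = (PySem.List.sorted s (fun x => x) false).drop n ∧
    (selectStep^[n] (s, ([] : List Int))).2 = (PySem.List.sorted s (fun x => x) false).take n := by
  induction n with
  | zero => simp
  | succ n ih =>
    obtain ⟨ih1, ih2⟩ := ih (by omega)
    rw [Function.iterate_succ_apply']
    have hlen : (PySem.List.sorted s (fun x => x) false).length = s.length := PySem.List.length_sorted s (fun x => x) false
    have hlt : n < (PySem.List.sorted s (fun x => x) false).length := by omega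
    have hdrop : (PySem.List.sorted s (fun x => x) false).drop n
        = (PySem.List.sorted s (fun x => x) false)[n] :: (PySem.List.sorted s (fun x => x) false).drop (n+1) :=
      List.drop_eq_getElem_cons hlt
    have hsort1 : PySem.List.sorted (selectStep^[n] (s, ([] : List Int))).1 (fun x => x) false
        = (PySem.List.sorted s (fun x => x) false)[n] :: (PySem.List.sorted s (fun x => x) false).drop (n+1) := by
      rw [ih1, hdrop]
    have hm := min_eq_sorted_head _ _ _ hsort1
    constructor
    · simp only [selectStep]
      rw [hm]
      exact sorted_remove_head _ _ _ hsort1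
    · simp only [selectStep]
      rw [hm, ih2, List.take_add_one]
      congr 1
      simp [List.getElem?_eq_getElem hlt]

-- per-command agreement
theorem select_eq (s : List Int) (k : Int) (h1 : 1 ≤ k) (h2 : k ≤ (s.length : Int)) :
    PySem.List.pyGetD ((PySem.List.pyRange 0 k 1).foldl (fun p _ => selectStep p) (s, ([] : List Int))).2 (k - 1) 0
      = PySem.List.pyGetD (PySem.List.sorted s (fun x => x) false) (k - 1) 0 := by
  rw [foldl_const_iterate selectStep _ (s, ([] : List Int))]
  have hlenr : (PySem.List.pyRange 0 k 1).length = k.toNat := by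
    rw [PySem.List.length_pyRange_one]; norm_num
  rw [hlenr]
  obtain ⟨-, h22⟩ := select_inv s k.toNat (by omega)
  rw [h22]
  have hlen : (PySem.List.sorted s (fun x => x) false).length = s.length := PySem.List.length_sorted s (fun x => x) false
  have hi0 : (0 : Int) ≤ k - 1 := by omega
  have htlen : ((PySem.List.sorted s (fun x => x) false).take k.toNat).length = k.toNat := by
    rw [List.length_take]; omega
  have hi1 : k - 1 < (((PySem.List.sorted s (fun x => x) false).take k.toNat).length : Int) := by
    rw [htlen]; omega
  have hi2 : k - 1 < ((PySem.List.sorted s (fun x => x) false).length : Int) := by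
    rw [hlen]; omega
  have e1 : PySem.List.pyGetD ((PySem.List.sorted s (fun x => x) false).take k.toNat) (k - 1) 0
      = ((PySem.List.sorted s (fun x => x) false).take k.toNat)[(k - 1).toNat]'(by omega) :=
    PySem.List.pyGetD_eq_getElem _ _ hi0 (by omega)
  have e2 : PySem.List.pyGetD (PySem.List.sorted s (fun x => x) false) (k - 1) 0
      = (PySem.List.sorted s (fun x => x) false)[(k - 1).toNat]'(by omega) :=
    PySem.List.pyGetD_eq_getElem _ _ hi0 (by omega)
  rw [e1, e2]
  simp [List.getElem_take]

theorem foldl_congr_mem' {α β : Type} (l : List α) (f g : β → α → β) (init : β)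
    (h : ∀ b a, a ∈ l → f b a = g b a) : l.foldl f init = l.foldl g init := by
  induction l generalizing init with
  | nil => rfl
  | cons x xs ih => simp only [List.foldl_cons, h init x (by simp)]
                    exact ih _ (fun b a ha => h b a (by simp [ha]))

-- ===== VERDICT (by name: the statement is the Claim_ definition above) =====
theorem solution_spec : Claim_equal_solution := by
  intro array commands _ hpre
  unfold Spec_solution
  have hA : solution array commands = commands.foldl (fun answer c =>
      answer ++ [PySem.List.pyGetD (PySem.List.sorted
        (PySem.List.slice array (some (PySem.List.pyGetD c 0 0 - 1)) (some (PySem.List.pyGetD c 1 0)))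
        (fun x => x) false) (PySem.List.pyGetD c 2 0 - 1) 0]) [] :=
    PySem.List.foldl_pyRange_zero_pyGetD' commands []
      (fun answer cmd =>
        answer ++ [PySem.List.pyGetD (PySem.List.sorted
          (PySem.List.slice array (some (PySem.List.pyGetD cmd 0 0 - 1)) (some (PySem.List.pyGetD cmd 1 0)))
          (fun x => x) false) (PySem.List.pyGetD cmd 2 0 - 1) 0]) []
  rw [hA]
  show _ = commands.foldl _ []
  apply foldl_congr_mem'
  intro b c hc
  obtain ⟨-, h1, h2⟩ := hpre c hc
  simp only []
  rw [select_eq _ _ h1 h2]
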